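-- pv_equiv track=rewrite | github.com/PQTATOS/pyWork | vacancy.py | int_form
-- ===== SOURCE A (Python) =====
-- import math
--
-- def int_form(digit):
--     digit = (lambda x: x[:-2] if x[-2:] == '.0' else x)(digit)
--
--     prevT = 0
--     curT = (lambda x: 3 if x == 0 else x)(int(len(digit) % 3))
--     new_dig = ""
--     if len(digit) == 3:
--         return str(digit)
--     for i in range(math.ceil(len(digit) / 3)):
--         if i == 0:
--             new_dig += digit[:curT]
--         else:
--             new_dig += " " + digit[prevT:curT]
--         prevT = curT
--         curT += 3
--
--     return new_dig
-- ===== SOURCE B (Python) =====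
-- def int_form(digit):
--     if digit.endswith('.0'):
--         digit = digit[:-2]
--     chunks = []
--     i = len(digit)
--     while i > 0:
--         chunks.append(digit[max(0, i - 3):i])
--         i -= 3
--     return ' '.join(reversed(chunks))
-- ===== Notes on version B (the rewrite author's own statement) =====
-- stated objective: simpler
-- what changed: B strips the trailing '.0' and then groups the string right-to-left into chunks of three collected in a list joined by spaces, replacing A's left-to-right index loop with prevT/curT bookkeeping, its ceil(len/3) range and its special case for length 3.
import Mathlib
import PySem

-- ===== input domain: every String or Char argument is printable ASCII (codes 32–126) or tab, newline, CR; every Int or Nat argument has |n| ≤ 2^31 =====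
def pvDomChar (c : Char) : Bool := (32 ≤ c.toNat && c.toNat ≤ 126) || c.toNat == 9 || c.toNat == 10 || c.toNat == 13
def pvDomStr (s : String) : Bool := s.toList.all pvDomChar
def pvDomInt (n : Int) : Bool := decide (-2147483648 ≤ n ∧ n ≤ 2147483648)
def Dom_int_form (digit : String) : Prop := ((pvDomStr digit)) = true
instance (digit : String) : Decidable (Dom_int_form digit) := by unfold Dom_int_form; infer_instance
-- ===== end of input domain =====

-- B groups the digits right-to-left into chunks of three instead of A's left-to-right
-- index loop; objective: simpler (same O(n) cost, no special case for length 3).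

-- ===== PORT A =====
-- one step of A's `for i in range(...)` loop; state = (prevT, curT, new_dig)
def intFormAStep (digit : List Char) (st : Int × Int × List Char) (i : Int) :
    Int × Int × List Char :=
  let prevT := st.1
  let curT := st.2.1
  let new_dig := st.2.2
  let new_dig :=
    if i = 0 then new_dig ++ PySem.List.slice digit none (some curT)
    else new_dig ++ ' ' :: PySem.List.slice digit (some prevT) (some curT)
  (curT, curT + 3, new_dig)

-- A's body after the '.0' strip; (len+2)/3 is math.ceil(len/3), exact for a Nat length
def intFormACore (digit : List Char) : List Char :=
  let curT : Int := if digit.length % 3 = 0 then 3 else ((digit.length % 3 : Nat) : Int)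
  if digit.length = 3 then digit
  else
    ((PySem.List.pyRange 0 (((digit.length + 2) / 3 : Nat) : Int) 1).foldl
      (intFormAStep digit) (0, curT, [])).2.2

def int_form (digit : String) : String :=
  let d := digit.toList
  let d := if PySem.List.slice d (some (-2)) none = ['.', '0']
           then PySem.List.slice d none (some (-2)) else d
  String.ofList (intFormACore d)

-- ===== PORT B =====
-- Source B's `while i > 0` loop, collecting digit[max(0, i-3):i]; Nat subtraction IS max(0, i-3)
def intFormBChunks (digit : List Char) (i : Nat) : List (List Char) :=
  if 0 < i then
    PySem.List.slice digit (some ((i - 3 : Nat) : Int)) (some (i : Int)) ::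
      intFormBChunks digit (i - 3)
  else []
termination_by i

def int_form_alt (digit : String) : String :=
  let d := digit.toList
  let d := if PySem.Chars.endswith d ['.', '0']
           then PySem.List.slice d none (some (-2)) else d
  String.ofList (PySem.Chars.join [' '] ((intFormBChunks d d.length).reverse))

-- ===== PRECONDITION & SPEC =====
def Spec_int_form (digit : String) (out : String) : Prop := out = int_form_alt digit
instance (digit : String) (out : String) : Decidable (Spec_int_form digit out) := by unfold Spec_int_form; infer_instance

-- ===== CLAIM (what is proved, stated in full; the proofs are below) =====
def Claim_equal_int_form : Prop := ∀ (digit : String), Dom_int_form digit → Spec_int_form digit (int_form digit)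

-- ===== LEMMAS AND PROOFS =====

-- chunks at positions p, p+3, …, p+3(k-1), in left-to-right order
def chunksL (s : List Char) (p k : Nat) : List (List Char) :=
  match k with
  | 0 => []
  | k + 1 => (s.drop p).take 3 :: chunksL s (p + 3) k

theorem chunksL_snoc (s : List Char) (k : Nat) : ∀ p,
    chunksL s p (k + 1) = chunksL s p k ++ [(s.drop (p + 3 * k)).take 3] := by
  induction k with
  | zero => intro p; simp [chunksL]
  | succ k ih =>
    intro p
    rw [chunksL, ih (p + 3)]
    simp [chunksL]
    ring_nf

-- B's right-to-left chunk list, reversed, is the left-to-right chunk list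
theorem chunks_rev (s : List Char) (k : Nat) : ∀ c, 0 < c → c ≤ 3 →
    intFormBChunks s (c + 3 * k) = (chunksL s c k).reverse ++ [s.take c] := by
  induction k with
  | zero =>
    intro c hc1 hc3
    rw [intFormBChunks]
    simp only [Nat.mul_zero, Nat.add_zero]
    rw [if_pos hc1, intFormBChunks]
    have h0 : c - 3 = 0 := by omega
    rw [if_neg (by omega : ¬ 0 < c - 3), h0]
    simp [chunksL]
  | succ k ih =>
    intro c hc1 hc3
    rw [intFormBChunks, if_pos (by omega : 0 < c + 3 * (k + 1))]
    have h1 : c + 3 * (k + 1) - 3 = c + 3 * k := by omega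
    have e1 : ((c + 3 * (k + 1) : Nat) : Int) = ((c + 3 * k : Nat) : Int) + ((3 : Nat) : Int) := by
      push_cast; ring
    rw [h1, e1, PySem.List.slice_natCast_add, ih c hc1 hc3, chunksL_snoc]
    simp [List.reverse_append]

-- join with a single-space separator, as "head ++ flatMap (' ' :: ·) tail"
theorem join_space (x : List Char) (cs : List (List Char)) :
    PySem.Chars.join [' '] (x :: cs) = x ++ cs.flatMap (fun ch => ' ' :: ch) := by
  induction cs generalizing x with
  | nil => simp [PySem.Chars.join_singleton]
  | cons y t ih => rw [PySem.Chars.join_cons_cons, ih y]; simp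

-- A's loop after the first iteration: every i ≥ 1, so each step appends " " ++ chunk
theorem foldA_tail (s : List Char) (k : Nat) : ∀ (a : Int) (p : Nat) (acc : List Char),
    1 ≤ a →
    (PySem.List.pyRange a (a + k) 1).foldl (intFormAStep s) ((p : Int), ((p : Int) + 3), acc)
      = (((p + 3 * k : Nat) : Int), ((p + 3 * k : Nat) : Int) + 3,
          acc ++ (chunksL s p k).flatMap (fun ch => ' ' :: ch)) := by
  induction k with
  | zero =>
    intro a p acc ha
    rw [show a + (0 : Nat) = a by push_cast; ring, PySem.List.pyRange_one_eq_nil (le_refl a)]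
    simp [chunksL]
  | succ k ih =>
    intro a p acc ha
    have hk1 : (((k + 1 : Nat)) : Int) = (k : Int) + 1 := by push_cast; ring
    rw [hk1, PySem.List.pyRange_one_cons (by omega : a < a + ((k : Int) + 1)),
      List.foldl_cons]
    have hstep : intFormAStep s ((p : Int), ((p : Int) + 3), acc) a
        = (((p + 3 : Nat) : Int), (((p + 3 : Nat) : Int) + 3),
            acc ++ (' ' :: (s.drop p).take 3)) := by
      simp only [intFormAStep]
      rw [if_neg (by omega : ¬ a = 0)]
      have : PySem.List.slice s (some (p : Int)) (some ((p : Int) + 3))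
          = (s.drop p).take 3 := by
        rw [show ((p : Int) + 3) = ((p + 3 : Nat) : Int) by push_cast; ring,
          PySem.List.slice_natCast]
        congr 1; omega
      rw [this]; push_cast; ring_nf
    rw [hstep]
    have harr : a + ((k : Int) + 1) = (a + 1) + (k : Nat) := by ring
    rw [harr, ih (a + 1) (p + 3) (acc ++ (' ' :: (s.drop p).take 3)) (by omega)]
    rw [chunksL]
    simp only [List.flatMap_cons, List.append_assoc, Prod.mk.injEq]
    refine ⟨by omega, by omega, trivial⟩

-- the core equality on an arbitrary (post-strip) character list
theorem core_eq (s : List Char) :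
    intFormACore s = PySem.Chars.join [' '] ((intFormBChunks s s.length).reverse) := by
  rcases Nat.eq_zero_or_pos s.length with h0 | hpos
  · rw [intFormACore, intFormBChunks]
    rw [if_neg (by omega : ¬ 0 < s.length), if_neg (by omega : ¬ s.length = 3)]
    rw [show (((s.length + 2) / 3 : Nat) : Int) = 0 by omega]
    rw [PySem.List.pyRange_one_eq_nil (le_refl 0)]
    simp [PySem.Chars.join_nil]
  · -- n > 0: write n = c + 3k with 0 < c ≤ 3
    set n := s.length with hn
    obtain ⟨c, k, hc1, hc3, hnck, hceil, hcurT⟩ :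
        ∃ c k, 0 < c ∧ c ≤ 3 ∧ n = c + 3 * k ∧ (n + 2) / 3 = k + 1 ∧
          (if n % 3 = 0 then (3 : Int) else ((n % 3 : Nat) : Int)) = ((c : Nat) : Int) := by
      rcases Nat.eq_zero_or_pos (n % 3) with hm | hm
      · exact ⟨3, n / 3 - 1, by omega, by omega, by omega, by omega, by
          rw [if_pos hm]; norm_num⟩
      · exact ⟨n % 3, n / 3, hm, by omega, by omega, by omega, by
          rw [if_neg (by omega)]⟩
    have hB : PySem.Chars.join [' '] ((intFormBChunks s n).reverse)
        = s.take c ++ (chunksL s c k).flatMap (fun ch => ' ' :: ch) := by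
      rw [hnck, chunks_rev s k c hc1 hc3]
      simp only [List.reverse_append, List.reverse_reverse, List.reverse_singleton]
      exact join_space _ _
    rw [hB, intFormACore]
    simp only [← hn, hcurT, hceil]
    by_cases h3 : n = 3
    · rw [if_pos h3]
      have hc : c = 3 := by omega
      have hk : k = 0 := by omega
      rw [hc, hk]
      simp [chunksL, List.take_of_length_le (by omega : s.length ≤ 3)]
    · rw [if_neg h3]
      rw [show ((k + 1 : Nat) : Int) = 0 + ((1 : Int) + k) by push_cast; ring]
      rw [PySem.List.pyRange_one_cons (by omega : (0 : Int) < 0 + ((1 : Int) + k)),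
        List.foldl_cons]
      have hstep0 : intFormAStep s (0, ((c : Nat) : Int), []) 0
          = (((c : Nat) : Int), (((c : Nat) : Int) + 3), s.take c) := by
        simp [intFormAStep, PySem.List.slice_to_natCast]
      rw [hstep0]
      rw [show (0 : Int) + ((1 : Int) + k) = 1 + (k : Nat) by ring,
        show (0 : Int) + 1 = (1 : Int) by ring]
      rw [foldA_tail s k 1 c (s.take c) (le_refl 1)]

-- the two ports strip the same suffix
theorem strip_eq (l : List Char) :
    (PySem.List.slice l (some (-2)) none = ['.', '0'])
      ↔ PySem.Chars.endswith l ['.', '0'] = true := by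
  rw [PySem.Chars.endswith_iff, PySem.List.slice_from_neg_ofNat l 2 (by omega)]
  constructor
  · intro h; rw [← h]; exact List.drop_suffix _ _
  · intro h
    obtain ⟨t, ht⟩ := h
    subst ht
    simp

-- ===== VERDICT (by name: the statement is the Claim_ definition above) =====
theorem int_form_spec : Claim_equal_int_form := by
  intro digit _
  unfold Spec_int_form int_form int_form_alt
  simp only
  by_cases h : PySem.List.slice digit.toList (some (-2)) none = ['.', '0']
  · rw [if_pos h, if_pos ((strip_eq _).mp h), core_eq]
  · rw [if_neg h, if_neg (by rw [← strip_eq]; exact h), core_eq]
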